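-- pv_equiv track=rewrite | github.com/joshcollins02/CS2064 | calendars.py | toMiddle
-- ===== SOURCE A (Python) =====
-- def toMiddle(year):
--     '''Here is where you calculate from a modern year into a Middle Earth age
--     and year; Note that it should return a tuple of two integers'''
--     # This might be helpful...
--     # Length of each age
--     ageLengths = [0, 590, 3441, 3021, 2000, 2000, 2000]
--     # Convert to Middle Earth year
--     t_year = year + 11081
--     # Initializing
--     age = 1
--     # Looping through the ages
--     while age < len(ageLengths) and t_year > ageLengths[age]:
--         t_year -= ageLengths[age]
--         age += 1
--     # Handles change in age if == 2000
--     if t_year == 2000: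
--         t_year = 0
--         age = age + 1
--     return age, t_year
-- ===== SOURCE B (Python) =====
-- def toMiddle(year):
--     '''Convert a modern year to a Middle Earth (age, year) tuple using
--     precomputed cumulative age boundaries instead of a subtracting loop.'''
--     prefix = [0, 590, 4031, 7052, 9052, 11052, 13052]
--     t = year + 11081
--     age = next((a for a in range(1, 7) if t <= prefix[a]), 7)
--     remaining = t - prefix[age - 1]
--     if remaining == 2000:
--         return age + 1, 0
--     return age, remaining
-- ===== Notes on version B (the rewrite author's own statement) =====
-- stated objective: simpler
-- what changed: Replaces the subtracting while-loop over per-age lengths with a direct lookup of the age in a precomputed cumulative-boundary table and one subtraction.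
import Mathlib
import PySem

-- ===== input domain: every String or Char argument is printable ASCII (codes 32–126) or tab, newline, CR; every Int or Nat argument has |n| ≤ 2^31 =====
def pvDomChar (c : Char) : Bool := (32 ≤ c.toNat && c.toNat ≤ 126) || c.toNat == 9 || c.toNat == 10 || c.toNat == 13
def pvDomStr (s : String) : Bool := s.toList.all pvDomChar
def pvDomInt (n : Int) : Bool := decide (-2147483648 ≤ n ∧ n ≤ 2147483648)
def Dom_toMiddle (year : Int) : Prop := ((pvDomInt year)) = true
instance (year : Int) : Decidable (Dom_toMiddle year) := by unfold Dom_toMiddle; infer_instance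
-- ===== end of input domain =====

-- B replaces A's subtracting while-loop with a direct age lookup in a precomputed cumulative-boundary table (simpler decomposition, same cost).

-- ===== PORT A =====
def ageLengths : List Int := [0, 590, 3441, 3021, 2000, 2000, 2000]

-- the 'while age < len(ageLengths) and t_year > ageLengths[age]' loop; it runs at most 6 times, so fuel 6 is exact
def toMiddleLoop : Nat → Int → Int → Int × Int
  | 0, age, t => (age, t)
  | Nat.succ f, age, t =>
    if age < 7 ∧ t > (PySem.List.pyGet? ageLengths age).getD 0 then
      toMiddleLoop f (age + 1) (t - (PySem.List.pyGet? ageLengths age).getD 0)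
    else (age, t)

def toMiddle (year : Int) : Int × Int :=
  let r := toMiddleLoop 6 1 (year + 11081)
  if r.2 = 2000 then (r.1 + 1, 0) else r

-- ===== PORT B =====
def mePrefix : List Int := [0, 590, 4031, 7052, 9052, 11052, 13052]

def toMiddle_alt (year : Int) : Int × Int :=
  let t := year + 11081
  let age := ((PySem.List.pyRange 1 7 1).find? (fun a => t ≤ (PySem.List.pyGet? mePrefix a).getD 0)).getD 7
  let remaining := t - (PySem.List.pyGet? mePrefix (age - 1)).getD 0
  if remaining = 2000 then (age + 1, 0) else (age, remaining)

-- ===== PRECONDITION & SPEC =====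
def Spec_toMiddle (year : Int) (out : Int × Int) : Prop := out = toMiddle_alt year
instance (year : Int) (out : Int × Int) : Decidable (Spec_toMiddle year out) := by unfold Spec_toMiddle; infer_instance

-- ===== CLAIM (what is proved, stated in full; the proofs are below) =====
def Claim_equal_toMiddle : Prop := ∀ (year : Int), Dom_toMiddle year → Spec_toMiddle year (toMiddle year)

-- ===== LEMMAS AND PROOFS =====

-- A's loop, evaluated to a closed cascade of interval tests on t = year + 11081
lemma loopA_eval (t : Int) : toMiddleLoop 6 1 t =
    if t ≤ 590 then (1, t) else if t ≤ 4031 then (2, t - 590)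
    else if t ≤ 7052 then (3, t - 4031) else if t ≤ 9052 then (4, t - 7052)
    else if t ≤ 11052 then (5, t - 9052) else if t ≤ 13052 then (6, t - 11052)
    else (7, t - 13052) := by
  simp only [toMiddleLoop, PySem.List.pyGet?, PySem.List.pyIdx?, ageLengths]
  norm_num
  simp only [show ([0,590,3441,3021,2000,2000,2000]:List Int)[Int.toNat 2] = 3441 from rfl,
    show ([0,590,3441,3021,2000,2000,2000]:List Int)[Int.toNat 3] = 3021 from rfl,
    show ([0,590,3441,3021,2000,2000,2000]:List Int)[Int.toNat 4] = 2000 from rfl,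
    show ([0,590,3441,3021,2000,2000,2000]:List Int)[Int.toNat 5] = 2000 from rfl,
    show ([0,590,3441,3021,2000,2000,2000]:List Int)[Int.toNat 6] = 2000 from rfl]
  split_ifs <;> first | (exfalso; omega) | (apply Prod.ext <;> simp <;> omega)

-- B's age lookup, evaluated to the same cascade of interval tests
lemma find_eval (t : Int) :
    (((PySem.List.pyRange 1 7 1).find? (fun a => decide (t ≤ (PySem.List.pyGet? mePrefix a).getD 0))).getD 7 : Int) =
    if t ≤ 590 then 1 else if t ≤ 4031 then 2 else if t ≤ 7052 then 3
    else if t ≤ 9052 then 4 else if t ≤ 11052 then 5 else if t ≤ 13052 then 6 else 7 := by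
  rw [show PySem.List.pyRange 1 7 1 = [1,2,3,4,5,6] from rfl]
  simp only [List.find?, PySem.List.pyGet?, PySem.List.pyIdx?, mePrefix]
  norm_num
  by_cases h1 : t ≤ 590 <;> by_cases h2 : t ≤ 4031 <;> by_cases h3 : t ≤ 7052 <;>
    by_cases h4 : t ≤ 9052 <;> by_cases h5 : t ≤ 11052 <;> by_cases h6 : t ≤ 13052 <;>
    simp [h1, h2, h3, h4, h5, h6]

lemma alt_eval (year : Int) : toMiddle_alt year =
    (let t := year + 11081
     let age : Int := if t ≤ 590 then 1 else if t ≤ 4031 then 2 else if t ≤ 7052 then 3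
       else if t ≤ 9052 then 4 else if t ≤ 11052 then 5 else if t ≤ 13052 then 6 else 7
     let remaining := t - (PySem.List.pyGet? mePrefix (age - 1)).getD 0
     if remaining = 2000 then (age + 1, 0) else (age, remaining)) := by
  simp only [toMiddle_alt, find_eval]

lemma main_eq (year : Int) : toMiddle year = toMiddle_alt year := by
  rw [alt_eval]
  show (if (toMiddleLoop 6 1 (year + 11081)).2 = 2000 then ((toMiddleLoop 6 1 (year + 11081)).1 + 1, 0) else toMiddleLoop 6 1 (year + 11081)) = _
  rw [loopA_eval]
  by_cases h1 : year + 11081 ≤ 590 <;> by_cases h2 : year + 11081 ≤ 4031 <;>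
    by_cases h3 : year + 11081 ≤ 7052 <;> by_cases h4 : year + 11081 ≤ 9052 <;>
    by_cases h5 : year + 11081 ≤ 11052 <;> by_cases h6 : year + 11081 ≤ 13052 <;>
    first
      | omega
      | norm_num [h1, h2, h3, h4, h5, h6, PySem.List.pyGet?, PySem.List.pyIdx?, mePrefix,
           show ([0,590,4031,7052,9052,11052,13052]:List Int)[Int.toNat 0] = 0 from rfl,
           show ([0,590,4031,7052,9052,11052,13052]:List Int)[Int.toNat 1] = 590 from rfl,
           show ([0,590,4031,7052,9052,11052,13052]:List Int)[Int.toNat 2] = 4031 from rfl,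
           show ([0,590,4031,7052,9052,11052,13052]:List Int)[Int.toNat 3] = 7052 from rfl,
           show ([0,590,4031,7052,9052,11052,13052]:List Int)[Int.toNat 4] = 9052 from rfl,
           show ([0,590,4031,7052,9052,11052,13052]:List Int)[Int.toNat 5] = 11052 from rfl,
           show ([0,590,4031,7052,9052,11052,13052]:List Int)[Int.toNat 6] = 13052 from rfl]

-- ===== VERDICT (by name: the statement is the Claim_ definition above) =====
theorem toMiddle_spec : Claim_equal_toMiddle := by
  intro year _
  unfold Spec_toMiddle
  exact main_eq year
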